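-- pv_equiv track=rewrite | github.com/PoweredSnow/PythonStudy-Linux | HelloWorld/hangman/hangman.py | replace_letters
-- ===== SOURCE A (Python) =====
-- def replace_letters(string, locations, letter):
--     new_string = ''
--     for i in range(0, len(string)):
--         if i in locations:
--             new_string = new_string + letter
--         else:
--             new_string = new_string + string[i]
--     return new_string
-- ===== SOURCE B (Python) =====
-- def replace_letters(string, locations, letter):
--     pieces = list(string)
--     for i in locations:
--         if 0 <= i < len(pieces):
--             pieces[i] = letter
--     return ''.join(pieces)
-- ===== Notes on version B (the rewrite author's own statement) =====
-- stated objective: faster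
-- what changed: Instead of scanning every character and testing membership in locations, B builds a list from the string, assigns letter directly at each in-range location, and joins once.
import Mathlib
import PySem

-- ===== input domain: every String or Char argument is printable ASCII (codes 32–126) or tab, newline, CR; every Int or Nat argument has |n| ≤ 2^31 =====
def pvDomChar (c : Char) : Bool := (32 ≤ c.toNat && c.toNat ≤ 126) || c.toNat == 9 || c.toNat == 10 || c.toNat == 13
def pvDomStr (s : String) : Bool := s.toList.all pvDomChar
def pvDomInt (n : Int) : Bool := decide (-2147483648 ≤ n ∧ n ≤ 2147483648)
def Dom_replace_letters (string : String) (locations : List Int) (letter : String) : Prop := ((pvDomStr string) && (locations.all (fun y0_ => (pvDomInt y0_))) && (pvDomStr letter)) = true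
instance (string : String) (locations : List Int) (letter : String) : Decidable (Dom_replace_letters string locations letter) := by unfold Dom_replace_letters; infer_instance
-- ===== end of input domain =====

-- B replaces A's per-character scan with membership test by direct assignment of `letter`
-- into a list at each in-range location, joined once (objective: faster on long inputs).


-- ===== PORT A =====
-- for i in range(0, len(string)): new_string += letter if i in locations else string[i]
-- string[i] is always in range here, so the Option default of pyGet? is never used.
def replace_letters (string : String) (locations : List Int) (letter : String) : String :=
  String.ofList <|
    (PySem.List.pyRange 0 (PySem.Str.len string) 1).foldl
      (fun new_string i =>
        if locations.contains i then new_string ++ letter.toList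
        else new_string ++ (((PySem.Str.pyGet? string i).map (fun c => [c])).getD []))
      []

-- ===== PORT B =====
-- pieces = list(string); for i in locations: if 0 <= i < len(pieces): pieces[i] = letter; ''.join(pieces)
def replace_letters_alt (string : String) (locations : List Int) (letter : String) : String :=
  let pieces := locations.foldl
    (fun ps i => if 0 ≤ i ∧ i < (ps.length : Int) then ps.set i.toNat letter.toList else ps)
    (string.toList.map (fun c => [c]))
  String.ofList (PySem.Chars.join [] pieces)

-- ===== PRECONDITION & SPEC =====
def Spec_replace_letters (string : String) (locations : List Int) (letter : String) (out : String) : Prop := out = replace_letters_alt string locations letter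
instance (string : String) (locations : List Int) (letter : String) (out : String) : Decidable (Spec_replace_letters string locations letter out) := by unfold Spec_replace_letters; infer_instance

-- ===== CLAIM (what is proved, stated in full; the proofs are below) =====
def Claim_equal_replace_letters : Prop := ∀ (string : String) (locations : List Int) (letter : String), Dom_replace_letters string locations letter → Spec_replace_letters string locations letter (replace_letters string locations letter)

-- ===== LEMMAS AND PROOFS =====

-- '' .join with empty separator is flatten
lemma join_nil_eq_flatten (ps : List (List Char)) : PySem.Chars.join [] ps = ps.flatten := by
  show [].intercalate ps = ps.flatten
  induction ps with
  | nil => rfl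
  | cons h t ih =>
    cases t with
    | nil => simp [List.intercalate]
    | cons h2 t2 => simp_all [List.intercalate, List.intersperse]

lemma map_getD_range_self {α : Type} (d : α) (l : List α) :
    (List.range l.length).map (fun j => l.getD j d) = l := by
  apply List.ext_getElem
  · simp
  · intro i h1 h2
    simp [List.getElem?_eq_getElem h2]

-- B's fold over locations, characterised pointwise
lemma foldset_eq (L : List Char) (locs : List Int) (ps : List (List Char)) :
    locs.foldl
      (fun ps i => if 0 ≤ i ∧ i < (ps.length : Int) then ps.set i.toNat L else ps) ps
    = (List.range ps.length).map
        (fun j => if locs.contains ((j : Nat) : Int) then L else ps.getD j []) := by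
  induction locs generalizing ps with
  | nil =>
    simp only [List.foldl_nil]
    exact (map_getD_range_self [] ps).symm
  | cons i rest ih =>
    simp only [List.foldl_cons]
    rw [ih]
    by_cases hc : 0 ≤ i ∧ i < (ps.length : Int)
    · simp only [if_pos hc, List.length_set]
      apply List.map_congr_left
      intro j hj
      simp only [List.mem_range] at hj
      by_cases hr : ((j : Nat) : Int) ∈ rest
      · simp [hr]
      · have hset : (ps.set i.toNat L)[j]?.getD [] =
            if (j : Int) = i then L else ps[j]?.getD [] := by
          have hj' : j < (ps.set i.toNat L).length := by simpa using hj
          rw [List.getElem?_eq_getElem hj', List.getElem?_eq_getElem hj]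
          simp only [Option.getD_some, List.getElem_set]
          have : i.toNat = j ↔ (j : Int) = i := by omega
          simp [this]
        by_cases hji : (j : Int) = i
        · simp [hji, hset]
        · simp [hr, hji, hset]
    · simp only [if_neg hc]
      apply List.map_congr_left
      intro j hj
      simp only [List.mem_range] at hj
      have hji : ¬ ((j : Int) = i) := by omega
      simp [hji]

-- A's fold builds the concatenation of one piece per index
lemma foldA_eq (string letter : String) (locs : List Int) :
    (PySem.List.pyRange 0 (PySem.Str.len string) 1).foldl
      (fun new_string i =>
        if locs.contains i then new_string ++ letter.toList
        else new_string ++ (((PySem.Str.pyGet? string i).map (fun c => [c])).getD []))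
      []
    = ((List.range string.toList.length).map
        (fun j => if locs.contains ((j : Nat) : Int) then letter.toList
                  else ((PySem.Str.pyGet? string ((j : Nat) : Int)).map (fun c => [c])).getD [])).flatten := by
  have hstep : (fun (new_string : List Char) (i : Int) =>
        if locs.contains i then new_string ++ letter.toList
        else new_string ++ (((PySem.Str.pyGet? string i).map (fun c => [c])).getD []))
      = fun new_string i => new_string ++
          (if locs.contains i then letter.toList
           else ((PySem.Str.pyGet? string i).map (fun c => [c])).getD []) := by
    funext acc i
    by_cases h : i ∈ locs <;> simp [h]
  rw [hstep, PySem.List.foldl_append_eq_flatMap, PySem.Str.len_eq,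
      PySem.List.pyRange_zero_nat, List.flatMap_map, List.nil_append,
      List.flatMap_def]

-- ===== VERDICT (by name: the statement is the Claim_ definition above) =====
theorem replace_letters_spec : Claim_equal_replace_letters := by
  intro string locations letter _
  show _ = _
  unfold replace_letters replace_letters_alt
  dsimp only
  rw [foldA_eq, foldset_eq, join_nil_eq_flatten]
  congr 1
  congr 1
  rw [List.length_map]
  apply List.map_congr_left
  intro j hj
  simp only [List.mem_range] at hj
  by_cases hc : ((j : Nat) : Int) ∈ locations
  · simp [hc]
  · simp [hc, List.getElem?_eq_getElem hj, List.getElem?_eq_getElem (l := string.toList.map (fun c => [c])) (by simpa using hj)]
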